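-- pv_equiv track=rewrite | github.com/alons9911/Query_refinement | Algorithm/ProvenanceSearchValues_5_20220825.py | position_dominate
-- ===== SOURCE A (Python) =====
-- def position_dominate(p1, p2):
--     p1_higher = False
--     p2_higher = False
--     length = len(p1)
--     for i in range(length):
--         if p1[i] < p2[i]:
--             p1_higher = True
--         elif p2[i] < p1[i]:
--             p2_higher = True
--     if p1_higher and not p2_higher:
--         return 1
--     elif p2_higher and not p1_higher:
--         return 2
--     elif p2_higher and p1_higher:
--         return 3
--     else:  # p1 == p2
--         return 4
-- ===== SOURCE B (Python) =====
-- def position_dominate(p1, p2):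
--     diffs = [p1[i] - p2[i] for i in range(len(p1))]
--     if not diffs:
--         return 4
--     lo = min(diffs)
--     hi = max(diffs)
--     if lo < 0 and hi > 0:
--         return 3
--     if lo < 0:
--         return 1
--     if hi > 0:
--         return 2
--     return 4
-- ===== Notes on version B (the rewrite author's own statement) =====
-- stated objective: alternative
-- what changed: Instead of maintaining two boolean dominance flags in a loop, B builds the elementwise difference list and classifies by the signs of its min and max: min<0 means some p1[i]<p2[i], max>0 means some p2[i]<p1[i].
import Mathlib
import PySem

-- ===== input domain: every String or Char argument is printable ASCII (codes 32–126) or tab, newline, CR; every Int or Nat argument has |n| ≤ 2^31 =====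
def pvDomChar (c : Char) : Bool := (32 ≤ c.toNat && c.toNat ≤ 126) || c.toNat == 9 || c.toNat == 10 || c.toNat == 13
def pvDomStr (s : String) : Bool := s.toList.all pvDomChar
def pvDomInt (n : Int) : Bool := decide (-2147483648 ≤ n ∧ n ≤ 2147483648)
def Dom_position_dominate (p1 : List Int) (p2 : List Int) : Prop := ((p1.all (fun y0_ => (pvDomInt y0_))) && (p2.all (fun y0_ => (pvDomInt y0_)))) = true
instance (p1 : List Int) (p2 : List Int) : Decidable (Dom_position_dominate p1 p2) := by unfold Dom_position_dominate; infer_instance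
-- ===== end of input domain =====

-- B drops A's two boolean dominance flags: it builds the difference list and
-- classifies by the signs of its min and max (objective: alternative).
-- Both raise IndexError when p2 is shorter than p1; Pre_ excludes exactly those inputs.

-- ===== PORT A =====
-- A's loop over range(len(p1)); p1[i]/p2[i] are in range under Pre_ (out-of-range
-- would be IndexError in Python, excluded by Pre_), so getD 0 is exact there.
def position_dominate (p1 : List Int) (p2 : List Int) : Int :=
  let st := (List.range p1.length).foldl
    (fun (s : Bool × Bool) i =>
      if p1.getD i 0 < p2.getD i 0 then (true, s.2)
      else if p2.getD i 0 < p1.getD i 0 then (s.1, true)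
      else s) (false, false)
  if st.1 && !st.2 then 1
  else if st.2 && !st.1 then 2
  else if st.2 && st.1 then 3
  else 4

-- ===== PORT B =====
-- difference list, then min/max and a sign classification
def position_dominate_alt (p1 : List Int) (p2 : List Int) : Int :=
  let diffs := (List.range p1.length).map (fun i => p1.getD i 0 - p2.getD i 0)
  if diffs = [] then 4
  else
    match PySem.List.min? diffs (fun x => x), PySem.List.max? diffs (fun x => x) with
    | some lo, some hi =>
      if lo < 0 ∧ 0 < hi then 3
      else if lo < 0 then 1
      else if 0 < hi then 2
      else 4
    | _, _ => 4   -- unreachable: diffs ≠ []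

-- ===== PRECONDITION & SPEC =====
-- Pre_ excludes exactly the inputs where Python A raises IndexError (p2 shorter than p1).
def Pre_position_dominate (p1 : List Int) (p2 : List Int) : Prop := p1.length ≤ p2.length
instance (p1 : List Int) (p2 : List Int) : Decidable (Pre_position_dominate p1 p2) := by unfold Pre_position_dominate; infer_instance
def pvWitness_position_dominate : List Int × List Int := ([1, 2], [2, 1])

def Spec_position_dominate (p1 : List Int) (p2 : List Int) (out : Int) : Prop := out = position_dominate_alt p1 p2
instance (p1 : List Int) (p2 : List Int) (out : Int) : Decidable (Spec_position_dominate p1 p2 out) := by unfold Spec_position_dominate; infer_instance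

-- ===== CLAIM =====
def Claim_equal_position_dominate : Prop := ∀ (p1 : List Int) (p2 : List Int), Dom_position_dominate p1 p2 → Pre_position_dominate p1 p2 → Spec_position_dominate p1 p2 (position_dominate p1 p2)

-- ===== LEMMAS AND PROOFS =====

-- A's fold computes the pair "some element < 0 / some element > 0" over any index list.
theorem pv_fold_eq_any (p1 p2 : List Int) (l : List Nat) (s : Bool × Bool) :
    l.foldl (fun (s : Bool × Bool) i =>
      if p1.getD i 0 < p2.getD i 0 then (true, s.2)
      else if p2.getD i 0 < p1.getD i 0 then (s.1, true)
      else s) s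
    = (s.1 || l.any (fun i => decide (p1.getD i 0 < p2.getD i 0)),
       s.2 || l.any (fun i => decide (p2.getD i 0 < p1.getD i 0))) := by
  induction l generalizing s with
  | nil => simp
  | cons i t ih =>
    simp only [List.foldl_cons, List.any_cons]
    rw [ih]
    by_cases h1 : p1.getD i 0 < p2.getD i 0
    · have h2 : ¬ p2.getD i 0 < p1.getD i 0 := by omega
      simp only [List.getD_eq_getElem?_getD] at h1 h2
      simp [h1, h2]
    · by_cases h2 : p2.getD i 0 < p1.getD i 0 <;>
      · simp only [List.getD_eq_getElem?_getD] at h1 h2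
        simp [h1, h2]

-- "some element < 0" iff the minimum is < 0
theorem pv_any_neg_iff_min (l : List Int) (lo : Int)
    (h : PySem.List.min? l (fun x => x) = some lo) :
    (l.any (fun d => decide (d < 0)) = true) ↔ lo < 0 := by
  constructor
  · intro ha
    obtain ⟨x, hx, hxlt⟩ := List.any_eq_true.mp ha
    have := PySem.List.min?_isMin h x hx
    simp at hxlt
    omega
  · intro hlo
    exact List.any_eq_true.mpr ⟨lo, PySem.List.min?_mem h, by simpa⟩

-- "some element > 0" iff the maximum is > 0
theorem pv_any_pos_iff_max (l : List Int) (hi : Int)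
    (h : PySem.List.max? l (fun x => x) = some hi) :
    (l.any (fun d => decide (0 < d)) = true) ↔ 0 < hi := by
  constructor
  · intro ha
    obtain ⟨x, hx, hxlt⟩ := List.any_eq_true.mp ha
    have := PySem.List.max?_isMax h x hx
    simp at hxlt
    omega
  · intro hhi
    exact List.any_eq_true.mpr ⟨hi, PySem.List.max?_mem h, by simpa⟩

-- classification of A's flag chain by the signs of min and max
theorem pv_classify (l : List Int) :
    (if l.any (fun d => decide (d < 0)) && !(l.any (fun d => decide (0 < d))) then (1:Int)
     else if l.any (fun d => decide (0 < d)) && !(l.any (fun d => decide (d < 0))) then 2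
     else if l.any (fun d => decide (0 < d)) && l.any (fun d => decide (d < 0)) then 3
     else 4)
    = (if l = [] then 4 else
       match PySem.List.min? l (fun x => x), PySem.List.max? l (fun x => x) with
       | some lo, some hi =>
         if lo < 0 ∧ 0 < hi then 3 else if lo < 0 then 1 else if 0 < hi then 2 else 4
       | _, _ => 4) := by
  cases l with
  | nil => simp
  | cons d t =>
    have hlo : PySem.List.min? (d::t) (fun x => x) = some (t.foldl min d) :=
      PySem.List.min?_id_cons d t
    have hhi : PySem.List.max? (d::t) (fun x => x) = some (t.foldl max d) :=
      PySem.List.max?_id_cons d t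
    have a1 := pv_any_neg_iff_min (d::t) _ hlo
    have a2 := pv_any_pos_iff_max (d::t) _ hhi
    rw [if_neg (by simp : ¬ (d::t) = ([] : List Int)), hlo, hhi]
    cases h1 : (d::t).any (fun x => decide (x < 0)) <;>
      cases h2 : (d::t).any (fun x => decide (0 < x)) <;>
      rw [h1] at a1 <;> rw [h2] at a2 <;>
      simp at a1 a2 <;>
      simp only [h1, h2] <;> norm_num <;>
      split_ifs <;> omega

-- ===== VERDICT =====
theorem position_dominate_spec : Claim_equal_position_dominate := by
  intro p1 p2 _ _
  unfold Spec_position_dominate position_dominate position_dominate_alt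
  dsimp only
  rw [pv_fold_eq_any]
  simp only [Bool.false_or]
  have e1 : ((List.range p1.length).map (fun i => p1.getD i 0 - p2.getD i 0)).any
        (fun d => decide (d < 0))
      = (List.range p1.length).any (fun i => decide (p1.getD i 0 < p2.getD i 0)) := by
    rw [List.any_map]; congr 1; funext i
    simp [Function.comp, sub_neg]
  have e2 : ((List.range p1.length).map (fun i => p1.getD i 0 - p2.getD i 0)).any
        (fun d => decide (0 < d))
      = (List.range p1.length).any (fun i => decide (p2.getD i 0 < p1.getD i 0)) := by
    rw [List.any_map]; congr 1; funext i
    simp [Function.comp, sub_pos]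
  rw [← e1, ← e2]
  exact pv_classify _
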